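-- pv_equiv track=rewrite | github.com/JaegerErich/Bender | bender_generate_v8_1.py | get_all_equipment_from_data
-- ===== SOURCE A (Python) =====
-- from typing import Any, Dict, List, Optional, Tuple
--
-- def norm(s: Any) -> str:
--     return str(s).strip() if s is not None else ""
--
-- def get_all_equipment_from_data(data: Dict[str, List[Dict[str, Any]]]) -> List[str]:
--     """
--     Legacy: collect unique equipment from data. Prefer get_canonical_equipment_by_mode()
--     for the UI. Kept for CSV export and backward compatibility.
--     Excludes "Wall".
--     """
--     seen_lower: Dict[str, str] = {}
--     for category, drills in data.items():
--         if not isinstance(drills, list):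
--             continue
--         for d in drills:
--             eq = d.get("equipment")
--             if eq is None:
--                 continue
--             s = norm(str(eq))
--             if not s:
--                 continue
--             key = s.lower()
--             if key == "wall":
--                 continue
--             if key not in seen_lower:
--                 seen_lower[key] = s
--     out = []
--     if "none" in seen_lower:
--         out.append(seen_lower["none"])
--     rest = [v for k, v in sorted(seen_lower.items()) if k != "none"]
--     return out + rest
-- ===== SOURCE B (Python) =====
-- def get_all_equipment_from_data(data):
--     # Collect every valid (lowercase_key, original_string) pair, stable-sort by key,
--     # keep the first of each equal-key run (first-seen casing), emit "none" first.
--     pairs = []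
--     for drills in data.values():
--         if not isinstance(drills, list):
--             continue
--         for d in drills:
--             eq = d.get("equipment")
--             if eq is None:
--                 continue
--             s = str(eq).strip()
--             if not s:
--                 continue
--             key = s.lower()
--             if key != "wall":
--                 pairs.append((key, s))
--     pairs.sort(key=lambda p: p[0])  # stable sort
--     kept = []
--     prev = None
--     for key, s in pairs:
--         if key != prev:
--             kept.append((key, s))
--             prev = key
--     return [s for key, s in kept if key == "none"] + [s for key, s in kept if key != "none"]
-- ===== Notes on version B (the rewrite author's own statement) =====
-- stated objective: alternative
-- what changed: Replaces A's first-seen hash-map dedup followed by sorting the dict items with a single collected list of (key, original) pairs that is stable-sorted by key and then run-deduplicated in one scan (first of each run = first-seen casing), assembling 'none'-first output by two filters over that list.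
import Mathlib
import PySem

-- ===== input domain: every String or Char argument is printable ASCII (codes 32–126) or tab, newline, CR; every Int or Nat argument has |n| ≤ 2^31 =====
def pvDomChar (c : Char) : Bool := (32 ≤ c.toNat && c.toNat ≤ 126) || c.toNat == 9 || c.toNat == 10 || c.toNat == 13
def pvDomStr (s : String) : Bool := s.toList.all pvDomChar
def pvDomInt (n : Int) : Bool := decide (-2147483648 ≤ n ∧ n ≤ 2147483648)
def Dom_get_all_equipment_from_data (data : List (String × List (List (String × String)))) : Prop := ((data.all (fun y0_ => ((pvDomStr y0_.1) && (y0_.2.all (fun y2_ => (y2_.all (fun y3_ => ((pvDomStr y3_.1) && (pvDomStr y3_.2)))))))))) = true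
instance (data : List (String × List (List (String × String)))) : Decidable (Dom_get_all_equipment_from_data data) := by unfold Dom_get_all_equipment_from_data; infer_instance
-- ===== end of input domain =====

-- ===== PORT A =====
-- B replaces A's first-seen dict dedup + sort of the dict items by a stable sort of all
-- collected (key, original) pairs followed by a one-pass run dedup; same return value.
def get_all_equipment_from_data (data : List (String × List (List (String × String)))) : List String :=
  let seen : PySem.Dict String String :=
    data.foldl (fun seen cd =>
      cd.2.foldl (fun seen d =>
        match (PySem.Dict.mk d).get? "equipment" with
        | none => seen
        | some eq =>
          let s := PySem.Str.strip eq
          if s == "" then seen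
          else
            let key := PySem.Str.lower s
            if key == "wall" then seen
            else if seen.contains key then seen
            else seen.insert key s) seen)
      PySem.Dict.empty
  let out : List String :=
    match seen.get? "none" with
    | some v => [v]
    | none => []
  let rest : List String :=
    ((PySem.List.sorted2 seen.items (fun kv => kv.1) (fun kv => kv.2)).filter
        (fun kv => kv.1 != "none")).map (fun kv => kv.2)
  out ++ rest

-- ===== PORT B =====
def get_all_equipment_from_data_alt (data : List (String × List (List (String × String)))) : List String :=
  let pairs : List (String × String) :=
    data.foldl (fun acc cd =>
      cd.2.foldl (fun acc d =>
        match (PySem.Dict.mk d).get? "equipment" with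
        | none => acc
        | some eq =>
          let s := PySem.Str.strip eq
          if s == "" then acc
          else
            let key := PySem.Str.lower s
            if key != "wall" then acc ++ [(key, s)] else acc) acc)
      []
  let sortedPairs := PySem.List.sorted pairs (fun p => p.1)
  let kp : List (String × String) × Option String :=
    sortedPairs.foldl (fun st p =>
      if some p.1 != st.2 then (st.1 ++ [p], some p.1) else st) ([], none)
  let kept := kp.1
  ((kept.filter (fun p => p.1 == "none")).map (fun p => p.2))
    ++ ((kept.filter (fun p => p.1 != "none")).map (fun p => p.2))

-- ===== PRECONDITION & SPEC =====
def Spec_get_all_equipment_from_data (data : List (String × List (List (String × String)))) (out : List String) : Prop := out = get_all_equipment_from_data_alt data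
instance (data : List (String × List (List (String × String)))) (out : List String) : Decidable (Spec_get_all_equipment_from_data data out) := by unfold Spec_get_all_equipment_from_data; infer_instance

-- ===== CLAIM (what is proved, stated in full; the proofs are below) =====
def Claim_equal_get_all_equipment_from_data : Prop := ∀ (data : List (String × List (List (String × String)))), Dom_get_all_equipment_from_data data → Spec_get_all_equipment_from_data data (get_all_equipment_from_data data)

-- ===== LEMMAS AND PROOFS =====

-- ---- proof-side helpers ----

/-- The (key, original) pair a single drill dict contributes, or none if it is skipped. -/
def pvExtract (d : List (String × String)) : Option (String × String) :=
  match (PySem.Dict.mk d).get? "equipment" with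
  | none => none
  | some eq =>
    let s := PySem.Str.strip eq
    if s == "" then none
    else
      let key := PySem.Str.lower s
      if key == "wall" then none else some (key, s)

/-- All contributed pairs, in iteration order. -/
def pvPairs (data : List (String × List (List (String × String)))) : List (String × String) :=
  data.flatMap (fun cd => cd.2.filterMap pvExtract)

/-- A's per-pair dict step. -/
def pvInsIf (seen : PySem.Dict String String) (p : String × String) : PySem.Dict String String :=
  if seen.contains p.1 then seen else seen.insert p.1 p.2

/-- The same step on the item list. -/
def pvListIns (l : List (String × String)) (p : String × String) : List (String × String) :=
  if l.any (fun q => q.1 == p.1) then l else l ++ [p]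

/-- First-occurrence dedup of the pair list (= A's dict items). -/
def pvFirst (data : List (String × List (List (String × String)))) : List (String × String) :=
  (pvPairs data).foldl pvListIns []

/-- B's run-dedup of a (sorted) pair list, recursion form. -/
def pvDedupRuns : Option String → List (String × String) → List (String × String)
  | _, [] => []
  | prev, p :: rest =>
      if some p.1 != prev then p :: pvDedupRuns (some p.1) rest
      else pvDedupRuns prev rest

-- ---- B-side restructuring ----

theorem pvB_inner (drills : List (List (String × String))) (acc : List (String × String)) :
    drills.foldl (fun acc d =>
      match (PySem.Dict.mk d).get? "equipment" with
      | none => acc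
      | some eq =>
        let s := PySem.Str.strip eq
        if s == "" then acc
        else
          let key := PySem.Str.lower s
          if key != "wall" then acc ++ [(key, s)] else acc) acc
    = acc ++ drills.filterMap pvExtract := by
  induction drills generalizing acc with
  | nil => simp
  | cons d ds ih =>
    simp only [List.foldl_cons, List.filterMap_cons]
    have hstep : (match (PySem.Dict.mk d).get? "equipment" with
        | none => acc
        | some eq =>
          let s := PySem.Str.strip eq
          if s == "" then acc
          else
            let key := PySem.Str.lower s
            if key != "wall" then acc ++ [(key, s)] else acc)
        = acc ++ (pvExtract d).toList := by
      unfold pvExtract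
      cases (PySem.Dict.mk d).get? "equipment" with
      | none => simp
      | some eq => simp only [bne]; split_ifs <;> simp_all
    rw [hstep]
    cases h : pvExtract d with
    | none => simpa using ih acc
    | some p =>
      have h2 := ih (acc ++ [p])
      have h3 : acc ++ p :: List.filterMap pvExtract ds
          = (acc ++ [p]) ++ List.filterMap pvExtract ds := by simp
      exact h3 ▸ h2

theorem pvB_pairs (data : List (String × List (List (String × String)))) (acc : List (String × String)) :
    data.foldl (fun acc cd =>
      cd.2.foldl (fun acc d =>
        match (PySem.Dict.mk d).get? "equipment" with
        | none => acc
        | some eq =>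
          let s := PySem.Str.strip eq
          if s == "" then acc
          else
            let key := PySem.Str.lower s
            if key != "wall" then acc ++ [(key, s)] else acc) acc) acc
    = acc ++ pvPairs data := by
  induction data generalizing acc with
  | nil => simp [pvPairs]
  | cons cd rest ih =>
    simp only [List.foldl_cons]
    rw [pvB_inner, ih]
    simp [pvPairs, List.flatMap_cons]

theorem pvB_kept (l : List (String × String)) (kept : List (String × String)) (prev : Option String) :
    (l.foldl (fun st p => if some p.1 != st.2 then (st.1 ++ [p], some p.1) else st)
        (kept, prev)).1
    = kept ++ pvDedupRuns prev l := by
  induction l generalizing kept prev with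
  | nil => simp [pvDedupRuns]
  | cons p rest ih =>
    simp only [List.foldl_cons, pvDedupRuns]
    cases hb : (some p.1 != prev) with
    | false => simp only [Bool.false_eq_true, if_false]; exact ih kept prev
    | true =>
      simp only [if_true]
      rw [ih (kept ++ [p]) (some p.1)]
      simp

-- ---- A-side restructuring ----

theorem pvA_inner (drills : List (List (String × String))) (seen : PySem.Dict String String) :
    drills.foldl (fun seen d =>
      match (PySem.Dict.mk d).get? "equipment" with
      | none => seen
      | some eq =>
        let s := PySem.Str.strip eq
        if s == "" then seen
        else
          let key := PySem.Str.lower s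
          if key == "wall" then seen
          else if seen.contains key then seen
          else seen.insert key s) seen
    = (drills.filterMap pvExtract).foldl pvInsIf seen := by
  induction drills generalizing seen with
  | nil => simp
  | cons d ds ih =>
    simp only [List.foldl_cons, List.filterMap_cons]
    have hstep : (match (PySem.Dict.mk d).get? "equipment" with
        | none => seen
        | some eq =>
          let s := PySem.Str.strip eq
          if s == "" then seen
          else
            let key := PySem.Str.lower s
            if key == "wall" then seen
            else if seen.contains key then seen
            else seen.insert key s)
        = (match pvExtract d with
          | none => seen
          | some p => pvInsIf seen p) := by
      unfold pvExtract pvInsIf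
      cases (PySem.Dict.mk d).get? "equipment" with
      | none => simp
      | some eq => simp only; split_ifs <;> simp_all
    rw [hstep]
    cases h : pvExtract d with
    | none => exact ih seen
    | some p =>
      simp only [List.foldl_cons]
      exact ih (pvInsIf seen p)

theorem pvA_fold (data : List (String × List (List (String × String)))) (seen : PySem.Dict String String) :
    data.foldl (fun seen cd =>
      cd.2.foldl (fun seen d =>
        match (PySem.Dict.mk d).get? "equipment" with
        | none => seen
        | some eq =>
          let s := PySem.Str.strip eq
          if s == "" then seen
          else
            let key := PySem.Str.lower s
            if key == "wall" then seen
            else if seen.contains key then seen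
            else seen.insert key s) seen) seen
    = (pvPairs data).foldl pvInsIf seen := by
  induction data generalizing seen with
  | nil => simp [pvPairs]
  | cons cd rest ih =>
    simp only [List.foldl_cons]
    rw [pvA_inner, ih]
    simp [pvPairs, List.flatMap_cons, List.foldl_append]

theorem pvA_items (P : List (String × String)) (d : PySem.Dict String String) :
    (P.foldl pvInsIf d).items = P.foldl pvListIns d.items := by
  induction P generalizing d with
  | nil => simp
  | cons p P ih =>
    simp only [List.foldl_cons]
    rw [ih]
    congr 1
    simp only [pvInsIf, pvListIns, PySem.Dict.contains, PySem.Dict.insert]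
    by_cases h : d.items.any (fun q => q.1 == p.1) <;> simp [h]

-- ---- properties of pvFirst ----

theorem pvListIns_nodup (P acc : List (String × String))
    (h : (acc.map Prod.fst).Nodup) : ((P.foldl pvListIns acc).map Prod.fst).Nodup := by
  induction P generalizing acc with
  | nil => simpa using h
  | cons p P ih =>
    simp only [List.foldl_cons]
    apply ih
    by_cases hq : acc.any (fun q => q.1 == p.1)
    · simpa [pvListIns, hq] using h
    · have hni : ∀ a x, (a, x) ∈ acc → ¬ a = p.1 := by
        intro a x hax hc
        exact hq (List.any_eq_true.mpr ⟨(a, x), hax, by simpa using hc⟩)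
      simp [pvListIns, hq, List.nodup_append, h]
      exact hni
theorem pvListIns_mem (P : List (String × String)) (acc : List (String × String))
    (p : String × String) :
    p ∈ P.foldl pvListIns acc
      ↔ p ∈ acc ∨ ((∀ q ∈ acc, q.1 ≠ p.1) ∧ (P.filter (fun q => q.1 == p.1)).head? = some p) := by
  induction P generalizing acc with
  | nil => simp
  | cons r P ih =>
    simp only [List.foldl_cons]
    rw [ih, List.filter_cons]
    by_cases hr : acc.any (fun q => q.1 == r.1)
    · have hacc' : pvListIns acc r = acc := by simp [pvListIns, hr]
      rw [hacc']
      obtain ⟨w, hw, hwk⟩ : ∃ q, q ∈ acc ∧ q.1 = r.1 := by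
        obtain ⟨w, hw1, hw2⟩ := List.any_eq_true.mp hr
        exact ⟨w, hw1, by simpa using hw2⟩
      by_cases hrp : r.1 = p.1
      · have hbeq : (r.1 == p.1) = true := by simpa using hrp
        rw [hbeq]
        simp only [if_true, List.head?_cons, Option.some.injEq]
        have hnot : ¬ (∀ q ∈ acc, q.1 ≠ p.1) := fun hall => hall w hw (hwk.trans hrp)
        constructor
        · rintro (hin | ⟨hall, _⟩)
          · exact Or.inl hin
          · exact absurd hall hnot
        · rintro (hin | ⟨hall, _⟩)
          · exact Or.inl hin
          · exact absurd hall hnot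
      · have hbeq : (r.1 == p.1) = false := by simpa using hrp
        rw [hbeq]
        simp only [Bool.false_eq_true, if_false]
    · have hacc' : pvListIns acc r = acc ++ [r] := by simp [pvListIns, hr]
      rw [hacc']
      have hnone : ∀ q ∈ acc, q.1 ≠ r.1 := by
        intro q hqm hc
        exact hr (List.any_eq_true.mpr ⟨q, hqm, by simpa using hc⟩)
      by_cases hrp : r.1 = p.1
      · have hbeq : (r.1 == p.1) = true := by simpa using hrp
        rw [hbeq]
        simp only [if_true, List.head?_cons, Option.some.injEq]
        constructor
        · rintro (hin | ⟨hall, _⟩)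
          · rcases List.mem_append.mp hin with hin' | hin'
            · exact Or.inl hin'
            · rcases List.mem_singleton.mp hin' with rfl
              exact Or.inr ⟨fun q hq => hrp ▸ hnone q hq, rfl⟩
          · exact absurd hrp (hall r (List.mem_append_right _ (List.mem_singleton.mpr rfl)))
        · rintro (hin | ⟨hall, hpr⟩)
          · exact Or.inl (List.mem_append_left _ hin)
          · exact Or.inl (List.mem_append_right _ (List.mem_singleton.mpr hpr.symm))
      · have hbeq : (r.1 == p.1) = false := by simpa using hrp
        rw [hbeq]
        simp only [Bool.false_eq_true, if_false]
        constructor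
        · rintro (hin | ⟨hall, hh⟩)
          · rcases List.mem_append.mp hin with hin' | hin'
            · exact Or.inl hin'
            · rcases List.mem_singleton.mp hin' with rfl
              exact absurd rfl hrp
          · exact Or.inr ⟨fun q hq => hall q (List.mem_append_left _ hq), hh⟩
        · rintro (hin | ⟨hall, hh⟩)
          · exact Or.inl (List.mem_append_left _ hin)
          · refine Or.inr ⟨?_, hh⟩
            intro q hq
            rcases List.mem_append.mp hq with hq' | hq'
            · exact hall q hq'
            · rcases List.mem_singleton.mp hq' with rfl
              exact fun hc => hrp hc
theorem pvFirst_nodup (data : List (String × List (List (String × String)))) :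
    ((pvFirst data).map Prod.fst).Nodup := by
  exact pvListIns_nodup _ _ (by simp)

theorem pvFirst_mem (data : List (String × List (List (String × String)))) (p : String × String) :
    p ∈ pvFirst data ↔ ((pvPairs data).filter (fun q => q.1 == p.1)).head? = some p := by
  rw [pvFirst, pvListIns_mem]
  simp

-- ---- stability of the insertion sort w.r.t. a fixed key value ----

theorem pv_filter_insertBy (x : String × String) (l : List (String × String)) (k : String)
    (hl : l.Pairwise (fun a b => a.1 ≤ b.1)) :
    (PySem.List.insertBy (fun a b => decide (a.1 < b.1)) x l).filter (fun q => q.1 == k)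
    = if x.1 == k then l.filter (fun q => q.1 == k) ++ [x] else l.filter (fun q => q.1 == k) := by
  induction l with
  | nil => by_cases h : x.1 = k <;> simp [PySem.List.insertBy, h]
  | cons y ys ih =>
    rw [PySem.List.insertBy.eq_2]
    by_cases hlt : x.1 < y.1
    · rw [if_pos (by simpa using hlt)]
      have hys : ∀ q ∈ y :: ys, y.1 ≤ q.1 := by
        intro q hq
        rcases List.mem_cons.mp hq with rfl | hq'
        · exact le_refl _
        · exact (List.pairwise_cons.mp hl).1 q hq'
      by_cases hx : x.1 = k
      · have hempty : (y :: ys).filter (fun q => q.1 == k) = [] := by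
          rw [List.filter_eq_nil_iff]
          intro q hq
          simpa using ne_of_gt (lt_of_lt_of_le (hx ▸ hlt) (hys q hq))
        rw [List.filter_cons, hempty]
        have hbx : (x.1 == k) = true := by simpa using hx
        rw [hbx]
        simp
      · have hbx : (x.1 == k) = false := by simpa using hx
        rw [List.filter_cons, hbx]
        simp
    · rw [if_neg (by simpa using hlt)]
      rw [List.filter_cons, List.filter_cons, ih ((List.pairwise_cons.mp hl).2)]
      by_cases hx : x.1 = k <;> by_cases hy : y.1 = k <;> simp [hx, hy]
theorem pv_filter_sorted (P : List (String × String)) (k : String) :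
    ((PySem.List.sorted P (fun p => p.1)).filter (fun q => q.1 == k))
    = P.filter (fun q => q.1 == k) := by
  rw [PySem.List.sorted_eq_foldl_insertBy]
  have main : ∀ (P : List (String × String)) (acc : List (String × String)),
      acc.Pairwise (fun a b => a.1 ≤ b.1) →
      ((P.foldl (fun acc x =>
          PySem.List.insertBy (fun a b => decide (a.1 < b.1)) x acc) acc).filter
        (fun q => q.1 == k))
      = acc.filter (fun q => q.1 == k) ++ P.filter (fun q => q.1 == k) := by
    intro P
    induction P with
    | nil => intro acc _; simp
    | cons x P ih =>
      intro acc hacc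
      simp only [List.foldl_cons]
      rw [ih _ (PySem.List.insertBy_pairwise_le (fun p => p.1) x acc hacc)]
      rw [pv_filter_insertBy x acc k hacc, List.filter_cons]
      by_cases hx : x.1 = k
      · simp [hx]
      · have : (x.1 == k) = false := by simpa using hx
        simp [this]
  simpa using main P [] (by simp)

-- ---- properties of pvDedupRuns on a key-sorted list ----

theorem pvDedupRuns_mem_lt (l : List (String × String))
    (hl : l.Pairwise (fun a b => a.1 ≤ b.1)) :
    ∀ k, (∀ x ∈ l, k ≤ x.1) → ∀ y ∈ pvDedupRuns (some k) l, k < y.1 := by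
  induction l with
  | nil => intro k _ y hy; simp [pvDedupRuns] at hy
  | cons q t ih =>
    rcases List.pairwise_cons.mp hl with ⟨hq, ht⟩
    intro k hk y hy
    by_cases hqk : q.1 = k
    · have hb : (some q.1 != some k) = false := by simp [hqk]
      rw [pvDedupRuns, hb] at hy
      simp only [Bool.false_eq_true, if_false] at hy
      exact ih ht k (fun x hx => hk x (List.mem_cons_of_mem q hx)) y hy
    · have hb : (some q.1 != some k) = true := by simp [hqk]
      rw [pvDedupRuns, hb] at hy
      simp only [if_true] at hy
      have hkq : k < q.1 := lt_of_le_of_ne (hk q (List.mem_cons_self)) (Ne.symm hqk)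
      rcases List.mem_cons.mp hy with rfl | hy'
      · exact hkq
      · exact lt_trans hkq (ih ht q.1 hq y hy')

theorem pvDedupRuns_pairwise (l : List (String × String))
    (hl : l.Pairwise (fun a b => a.1 ≤ b.1)) :
    ∀ p, (pvDedupRuns p l).Pairwise (fun a b => a.1 < b.1) := by
  induction l with
  | nil => intro p; simp [pvDedupRuns]
  | cons q t ih =>
    rcases List.pairwise_cons.mp hl with ⟨hq, ht⟩
    intro p
    rw [pvDedupRuns]
    cases hb : (some q.1 != p) with
    | false =>
      simp only [Bool.false_eq_true, if_false]
      exact ih ht p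
    | true =>
      simp only [if_true]
      exact List.pairwise_cons.mpr
        ⟨fun y hy => pvDedupRuns_mem_lt t ht q.1 hq y hy, ih ht (some q.1)⟩

theorem pvDedupRuns_mem_some (l : List (String × String))
    (hl : l.Pairwise (fun a b => a.1 ≤ b.1)) :
    ∀ k, (∀ x ∈ l, k ≤ x.1) → ∀ p,
      (p ∈ pvDedupRuns (some k) l ↔ p.1 ≠ k ∧ (l.filter (fun q => q.1 == p.1)).head? = some p) := by
  induction l with
  | nil => intro k _ p; simp [pvDedupRuns]
  | cons q t ih =>
    rcases List.pairwise_cons.mp hl with ⟨hq, ht⟩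
    intro k hk p
    rw [pvDedupRuns, List.filter_cons]
    by_cases hqk : q.1 = k
    · have hb : (some q.1 != some k) = false := by simp [hqk]
      rw [hb]
      simp only [Bool.false_eq_true, if_false]
      rw [ih ht k (fun x hx => hqk ▸ hq x hx) p]
      by_cases hqp : q.1 = p.1
      · have : (q.1 == p.1) = true := by simpa using hqp
        simp only [this, if_true, List.head?_cons, Option.some.injEq]
        constructor
        · rintro ⟨hne, _⟩
          exact absurd (hqp.symm.trans hqk) hne
        · rintro ⟨hne, rfl⟩
          exact absurd (hqp.symm.trans hqk) hne
      · have : (q.1 == p.1) = false := by simpa using hqp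
        simp [this]
    · have hb : (some q.1 != some k) = true := by simp [hqk]
      rw [hb]
      simp only [if_true]
      have hkq : k < q.1 := lt_of_le_of_ne (hk q (List.mem_cons_self)) (Ne.symm hqk)
      by_cases hqp : q.1 = p.1
      · have hbeq : (q.1 == p.1) = true := by simpa using hqp
        simp only [hbeq, if_true, List.head?_cons, Option.some.injEq, List.mem_cons]
        constructor
        · rintro (rfl | hmem)
          · exact ⟨by simpa [← hqp] using ne_of_gt hkq, rfl⟩
          · have := pvDedupRuns_mem_lt t ht q.1 hq p hmem
            exact absurd hqp (ne_of_lt this)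
        · rintro ⟨_, rfl⟩
          exact Or.inl rfl
      · have hbeq : (q.1 == p.1) = false := by simpa using hqp
        simp only [hbeq, Bool.false_eq_true, if_false, List.mem_cons]
        rw [ih ht q.1 hq p]
        constructor
        · rintro (rfl | ⟨hne, hh⟩)
          · exact absurd rfl hqp
          · refine ⟨?_, hh⟩
            have hp : p ∈ t := by
              have := List.mem_of_find?_eq_some ((List.head?_filter).symm ▸ hh : t.find? (fun q => q.1 == p.1) = some p)
              exact this
            exact ne_of_gt (lt_of_lt_of_le hkq (hq p hp))
        · rintro ⟨hne, hh⟩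
          refine Or.inr ⟨fun hc => hqp hc.symm, hh⟩

theorem pvDedupRuns_mem_none (l : List (String × String))
    (hl : l.Pairwise (fun a b => a.1 ≤ b.1)) (p : String × String) :
    p ∈ pvDedupRuns none l ↔ (l.filter (fun q => q.1 == p.1)).head? = some p := by
  cases l with
  | nil => simp [pvDedupRuns]
  | cons q t =>
    rcases List.pairwise_cons.mp hl with ⟨hq, ht⟩
    rw [pvDedupRuns, List.filter_cons]
    have hb : (some q.1 != (none : Option String)) = true := by simp
    rw [hb]
    simp only [if_true]
    by_cases hqp : q.1 = p.1
    · have hbeq : (q.1 == p.1) = true := by simpa using hqp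
      simp only [hbeq, if_true, List.head?_cons, Option.some.injEq, List.mem_cons]
      constructor
      · rintro (rfl | hmem)
        · exact rfl
        · have := pvDedupRuns_mem_lt t ht q.1 hq p hmem
          exact absurd hqp (ne_of_lt this)
      · rintro rfl
        exact Or.inl rfl
    · have hbeq : (q.1 == p.1) = false := by simpa using hqp
      simp only [hbeq, Bool.false_eq_true, if_false, List.mem_cons]
      rw [pvDedupRuns_mem_some t ht q.1 hq p]
      constructor
      · rintro (rfl | ⟨_, hh⟩)
        · exact absurd rfl hqp
        · exact hh
      · intro hh
        exact Or.inr ⟨fun hc => hqp hc.symm, hh⟩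

-- ---- sorted2 on a list with pairwise-distinct first keys ----

theorem pv_insertBy_pairwise_fst {before : String × String → String × String → Bool}
    (hb : ∀ a b, (before a b = true → a.1 ≤ b.1) ∧ (before a b = false → b.1 ≤ a.1))
    (x : String × String) (l : List (String × String))
    (hl : l.Pairwise (fun a b => a.1 ≤ b.1)) :
    (PySem.List.insertBy before x l).Pairwise (fun a b => a.1 ≤ b.1) := by
  induction l with
  | nil => simp [PySem.List.insertBy]
  | cons y ys ih =>
    rcases List.pairwise_cons.mp hl with ⟨hy, hys⟩
    rw [PySem.List.insertBy.eq_2]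
    cases hb0 : before x y with
    | true =>
      rw [if_pos rfl]
      refine List.pairwise_cons.mpr ⟨?_, hl⟩
      intro z hz
      rcases List.mem_cons.mp hz with rfl | hz'
      · exact (hb x z).1 hb0
      · exact le_trans ((hb x y).1 hb0) (hy z hz')
    | false =>
      rw [if_neg (by simp)]
      refine List.pairwise_cons.mpr ⟨?_, ih hys⟩
      intro z hz
      rcases (PySem.List.mem_insertBy _ _ _ _).mp hz with hzx | hz'
      · rw [hzx]; exact (hb x y).2 hb0
      · exact hy z hz' 

theorem pv_sorted2_pairwise_fst (xs : List (String × String)) :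
    (PySem.List.sorted2 xs (fun p => p.1) (fun p => p.2)).Pairwise (fun a b => a.1 ≤ b.1) := by
  have hb : ∀ a b : String × String,
      (((decide (a.1 < b.1) || (!decide (b.1 < a.1) && decide (a.2 < b.2)))) = true → a.1 ≤ b.1)
      ∧ (((decide (a.1 < b.1) || (!decide (b.1 < a.1) && decide (a.2 < b.2)))) = false → b.1 ≤ a.1) := by
    intro a b
    constructor
    · intro h
      by_cases h1 : a.1 < b.1
      · exact le_of_lt h1
      · by_cases h2 : b.1 < a.1
        · simp [h1, h2] at h
        · exact le_of_not_gt h2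
    · intro h
      by_cases h1 : a.1 < b.1
      · simp [h1] at h
      · exact le_of_not_gt h1
  have main : ∀ (P acc : List (String × String)), acc.Pairwise (fun a b => a.1 ≤ b.1) →
      (P.foldl (fun acc x => PySem.List.insertBy
        (fun a b : String × String =>
          decide (a.1 < b.1) || (!decide (b.1 < a.1) && decide (a.2 < b.2))) x acc) acc).Pairwise
        (fun a b => a.1 ≤ b.1) := by
    intro P
    induction P with
    | nil => intro acc h; simpa using h
    | cons x P ih =>
      intro acc h
      simp only [List.foldl_cons]
      exact ih _ (pv_insertBy_pairwise_fst hb x acc h)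
  exact main xs [] (by simp)

theorem pv_pairwise_lt_of_le_nodup (l : List (String × String))
    (hle : l.Pairwise (fun a b => a.1 ≤ b.1)) (hn : (l.map Prod.fst).Nodup) :
    l.Pairwise (fun a b => a.1 < b.1) := by
  have hne : l.Pairwise (fun a b : String × String => a.1 ≠ b.1) := List.pairwise_map.mp hn
  exact (hle.and hne).imp (fun h => lt_of_le_of_ne h.1 h.2)

theorem pv_sorted2_eq (xs ys : List (String × String))
    (hperm : ys.Perm xs) (hys : ys.Pairwise (fun a b => a.1 < b.1))
    (hn : (xs.map Prod.fst).Nodup) :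
    PySem.List.sorted2 xs (fun p => p.1) (fun p => p.2) = ys := by
  have hperm2 : (PySem.List.sorted2 xs (fun p => p.1) (fun p => p.2)).Perm ys :=
    (PySem.List.sorted2_perm xs _ _ false).trans hperm.symm
  have hle := pv_sorted2_pairwise_fst xs
  have hnodup2 : ((PySem.List.sorted2 xs (fun p => p.1) (fun p => p.2)).map Prod.fst).Nodup :=
    (List.Perm.nodup_iff ((PySem.List.sorted2_perm xs _ _ false).map Prod.fst)).mpr hn
  have hlt2 := pv_pairwise_lt_of_le_nodup _ hle hnodup2
  exact hperm2.eq_of_pairwise (fun a b _ _ h1 h2 => absurd h2 (lt_asymm h1)) hlt2 hys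

-- ---- the kept list equals sorted2 of A's dict items ----

theorem pv_kept_pairwise (data : List (String × List (List (String × String)))) :
    (pvDedupRuns none (PySem.List.sorted (pvPairs data) (fun p => p.1))).Pairwise
      (fun a b => a.1 < b.1) := by
  exact pvDedupRuns_pairwise _ (PySem.List.sorted_pairwise (pvPairs data) (fun p => p.1)) none

theorem pv_kept_mem (data : List (String × List (List (String × String)))) (p : String × String) :
    p ∈ pvDedupRuns none (PySem.List.sorted (pvPairs data) (fun p => p.1)) ↔ p ∈ pvFirst data := by
  rw [pvDedupRuns_mem_none _ (PySem.List.sorted_pairwise (pvPairs data) (fun p => p.1)) p,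
    pv_filter_sorted, ← pvFirst_mem]

theorem pv_kept_perm (data : List (String × List (List (String × String)))) :
    (pvDedupRuns none (PySem.List.sorted (pvPairs data) (fun p => p.1))).Perm (pvFirst data) := by
  have hknd : (pvDedupRuns none (PySem.List.sorted (pvPairs data) (fun p => p.1))).Nodup :=
    (pv_kept_pairwise data).imp (fun h hc => absurd (hc ▸ h) (lt_irrefl _))
  have hFnd : (pvFirst data).Nodup := (pvFirst_nodup data).of_map
  exact (List.perm_ext_iff_of_nodup hknd hFnd).mpr (pv_kept_mem data)

theorem pv_sorted2_first (data : List (String × List (List (String × String)))) :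
    PySem.List.sorted2 (pvFirst data) (fun p => p.1) (fun p => p.2)
    = pvDedupRuns none (PySem.List.sorted (pvPairs data) (fun p => p.1)) := by
  exact pv_sorted2_eq _ _ (pv_kept_perm data) (pv_kept_pairwise data) (pvFirst_nodup data)

-- ---- the "none" head ----

theorem pv_filter_key_of_mem (l : List (String × String)) (k : String)
    (hn : (l.map Prod.fst).Nodup) (p : String × String) (hp : p ∈ l) (hk : p.1 = k) :
    l.filter (fun q => q.1 == k) = [p] := by
  induction l with
  | nil => cases hp
  | cons a t ih =>
    have hn' := List.nodup_cons.mp (by simpa using hn :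
      (a.1 :: t.map Prod.fst).Nodup)
    rcases List.mem_cons.mp hp with rfl | hpt
    · have hba : (p.1 == k) = true := by simpa using hk
      rw [List.filter_cons, hba]
      simp only [if_true]
      have hft : t.filter (fun q => q.1 == k) = [] := by
        rw [List.filter_eq_nil_iff]
        intro q hq hc
        exact hn'.1 (List.mem_map.mpr ⟨q, hq, by
          have : q.1 = k := by simpa using hc
          rw [this, hk]⟩)
      rw [hft]
    · have hak : (a.1 == k) = false := by
        simp only [beq_eq_false_iff_ne, ne_eq]
        intro hc
        exact hn'.1 (List.mem_map.mpr ⟨p, hpt, by rw [hk, ← hc]⟩)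
      rw [List.filter_cons, hak]
      simp only [Bool.false_eq_true, if_false]
      exact ih (by simpa using hn'.2) hpt

theorem pv_none_part (data : List (String × List (List (String × String)))) :
    (match (PySem.Dict.mk (pvFirst data)).get? "none" with
      | some v => [v]
      | none => ([] : List String))
    = ((pvDedupRuns none (PySem.List.sorted (pvPairs data) (fun p => p.1))).filter
        (fun p => p.1 == "none")).map (fun p => p.2) := by
  have hget : (PySem.Dict.mk (pvFirst data)).get? "none"
      = ((pvFirst data).find? (fun q => q.1 == "none")).map (fun q => q.2) := rfl
  cases hf : (pvFirst data).find? (fun q => q.1 == "none") with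
  | none =>
    have hkept : (pvDedupRuns none (PySem.List.sorted (pvPairs data) (fun p => p.1))).filter
        (fun p => p.1 == "none") = [] := by
      rw [List.filter_eq_nil_iff]
      intro q hq hc
      exact (List.find?_eq_none.mp hf q ((pv_kept_mem data q).mp hq)) hc
    rw [hget, hf, hkept]
    simp
  | some w =>
    have hw : w ∈ pvFirst data := List.mem_of_find?_eq_some hf
    have hwk : w.1 = "none" := by simpa using List.find?_some hf
    have hkeptnd : ((pvDedupRuns none (PySem.List.sorted (pvPairs data)
        (fun p => p.1))).map Prod.fst).Nodup :=
      (List.pairwise_map.mpr (pv_kept_pairwise data)).imp ne_of_lt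
    have hfil : (pvDedupRuns none (PySem.List.sorted (pvPairs data) (fun p => p.1))).filter
        (fun p => p.1 == "none") = [w] :=
      pv_filter_key_of_mem _ _ hkeptnd w ((pv_kept_mem data w).mpr hw) hwk
    rw [hget, hf, hfil]
    simp


-- ===== VERDICT (by name: the statement is the Claim_ definition above) =====
theorem get_all_equipment_from_data_spec : Claim_equal_get_all_equipment_from_data := by
  intro data _
  unfold Spec_get_all_equipment_from_data
  have hseen : (pvPairs data).foldl pvInsIf PySem.Dict.empty = PySem.Dict.mk (pvFirst data) := by
    apply PySem.Dict.ext
    rw [pvA_items]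
    rfl
  have hA : get_all_equipment_from_data data
      = (match (PySem.Dict.mk (pvFirst data)).get? "none" with
          | some v => [v]
          | none => ([] : List String))
        ++ ((PySem.List.sorted2 (pvFirst data) (fun kv => kv.1) (fun kv => kv.2)).filter
            (fun kv => kv.1 != "none")).map (fun kv => kv.2) := by
    simp only [get_all_equipment_from_data]
    rw [pvA_fold data PySem.Dict.empty, hseen]
  have hB : get_all_equipment_from_data_alt data
      = ((pvDedupRuns none (PySem.List.sorted (pvPairs data) (fun p => p.1))).filter
            (fun p => p.1 == "none")).map (fun p => p.2)
        ++ ((pvDedupRuns none (PySem.List.sorted (pvPairs data) (fun p => p.1))).filter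
            (fun p => p.1 != "none")).map (fun p => p.2) := by
    simp only [get_all_equipment_from_data_alt]
    rw [pvB_pairs data [], List.nil_append, pvB_kept, List.nil_append]
  rw [hA, hB, pv_sorted2_first data, pv_none_part data]
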